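-- pv_equiv track=rewrite | github.com/pricecomstock/hello-world-bot | bot.py | make_url_safe
-- ===== SOURCE A (Python) =====
-- def make_url_safe(s):
--     replacements = [
--         ('%','%25'),
--         ('#','%23'),
--         (':','%3A'),
--         ('/','%2F'),
--         ('@','%40'),
--         ('?','%3F'),
--         (' ','%20')
--     ]
--     safe = s
--     for r in replacements:
--         safe = safe.replace(r[0],r[1])
--     return safe
-- ===== SOURCE B (Python) =====
-- _ESCAPES = {
--     '%': '%25',
--     '#': '%23',
--     ':': '%3A',
--     '/': '%2F',
--     '@': '%40',
--     '?': '%3F',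
--     ' ': '%20',
-- }
--
-- def make_url_safe(s):
--     return ''.join(_ESCAPES.get(c, c) for c in s)
-- ===== Notes on version B (the rewrite author's own statement) =====
-- stated objective: idiomatic
-- what changed: Replaces seven sequential full-string .replace passes with one character-level pass that emits each character's percent-escape from a lookup table and joins the pieces.
import Mathlib
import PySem

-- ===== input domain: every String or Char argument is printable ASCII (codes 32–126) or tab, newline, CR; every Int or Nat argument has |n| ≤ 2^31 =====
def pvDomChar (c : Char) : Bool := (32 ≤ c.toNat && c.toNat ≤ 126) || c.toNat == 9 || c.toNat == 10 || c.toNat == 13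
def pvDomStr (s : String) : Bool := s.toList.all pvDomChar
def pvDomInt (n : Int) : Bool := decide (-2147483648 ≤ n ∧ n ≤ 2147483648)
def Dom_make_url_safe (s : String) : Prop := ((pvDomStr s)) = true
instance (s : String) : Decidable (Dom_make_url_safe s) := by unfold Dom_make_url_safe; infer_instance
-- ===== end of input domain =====

-- B: one character-level pass emitting table-driven percent-escapes, instead of A's seven full-string replace passes (return value only; idiomatic rewrite).


-- ===== PORT A =====
def make_url_safe (s : String) : String :=
  let replacements : List (String × String) :=
    [("%", "%25"), ("#", "%23"), (":", "%3A"), ("/", "%2F"),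
     ("@", "%40"), ("?", "%3F"), (" ", "%20")]
  replacements.foldl (fun safe r => PySem.Str.replace safe r.1 r.2) s

-- ===== PORT B =====
def escTable : PySem.Dict Char String :=
  PySem.Dict.mk [('%', "%25"), ('#', "%23"), (':', "%3A"), ('/', "%2F"),
                 ('@', "%40"), ('?', "%3F"), (' ', "%20")]

def make_url_safe_alt (s : String) : String :=
  PySem.Str.join "" (s.toList.map (fun c => PySem.Dict.getD escTable c (String.ofList [c])))

-- ===== PRECONDITION & SPEC =====
def Spec_make_url_safe (s : String) (out : String) : Prop := out = make_url_safe_alt s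
instance (s : String) (out : String) : Decidable (Spec_make_url_safe s out) := by unfold Spec_make_url_safe; infer_instance

-- ===== CLAIM (what is proved, stated in full; the proofs are below) =====
def Claim_equal_make_url_safe : Prop := ∀ (s : String), Dom_make_url_safe s → Spec_make_url_safe s (make_url_safe s)

-- ===== LEMMAS AND PROOFS =====

/-- Replacing a single character `a` by `new` is a per-character flatMap. -/
def subChar (a : Char) (new : List Char) (c : Char) : List Char :=
  if c = a then new else [c]

theorem replace_go_single (a : Char) (new : List Char) :
    ∀ (fuel : Nat) (l acc : List Char), l.length ≤ fuel →
      PySem.Chars.replace.go [a] new fuel l acc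
        = acc.reverse ++ l.flatMap (subChar a new) := by
  intro fuel
  induction fuel with
  | zero =>
    intro l acc h
    have : l = [] := List.length_eq_zero_iff.mp (Nat.le_zero.mp h)
    subst this
    simp [PySem.Chars.replace.go]
  | succ n ih =>
    intro l acc h
    cases l with
    | nil => simp [PySem.Chars.replace.go]
    | cons c t =>
      simp only [PySem.Chars.replace.go]
      by_cases hc : c = a
      · subst hc
        have hp : [c].isPrefixOf (c :: t) = true := by simp [List.isPrefixOf]
        rw [if_pos hp]
        simp only [List.length_cons, List.length_nil, List.drop]
        rw [ih t (new.reverse ++ acc) (by simpa using Nat.lt_succ_iff.mp (by simpa using h))]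
        simp [subChar]
      · have hp : [a].isPrefixOf (c :: t) = false := by
          simp [List.isPrefixOf]
          exact fun hh => (hc hh.symm).elim
        rw [if_neg (by simp [hp])]
        rw [ih t (c :: acc) (by simpa using Nat.lt_succ_iff.mp (by simpa using h))]
        simp [subChar, hc]

theorem replace_single (a : Char) (new l : List Char) :
    PySem.Chars.replace l [a] new = l.flatMap (subChar a new) := by
  simp only [PySem.Chars.replace, List.isEmpty_cons]
  simpa using replace_go_single a new l.length l [] (le_refl _)

theorem composite_eq_escB (c : Char) :
    List.flatMap
      (fun x => List.flatMap
        (fun x => List.flatMap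
          (fun x => List.flatMap
            (fun x => List.flatMap
              (fun x => List.flatMap (subChar ' ' ['%', '2', '0']) (subChar '?' ['%', '3', 'F'] x))
              (subChar '@' ['%', '4', '0'] x))
            (subChar '/' ['%', '2', 'F'] x))
          (subChar ':' ['%', '3', 'A'] x))
        (subChar '#' ['%', '2', '3'] x))
      (subChar '%' ['%', '2', '5'] c)
    = (String.toList ∘ fun c => PySem.Dict.getD escTable c (String.ofList [c])) c := by
  by_cases h1 : c = '%'; · subst h1; decide
  by_cases h2 : c = '#'; · subst h2; decide
  by_cases h3 : c = ':'; · subst h3; decide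
  by_cases h4 : c = '/'; · subst h4; decide
  by_cases h5 : c = '@'; · subst h5; decide
  by_cases h6 : c = '?'; · subst h6; decide
  by_cases h7 : c = ' '; · subst h7; decide
  have e1 : ('%' == c) = false := by simp [Ne.symm h1]
  have e2 : ('#' == c) = false := by simp [Ne.symm h2]
  have e3 : ((':' : Char) == c) = false := by simp [Ne.symm h3]
  have e4 : ('/' == c) = false := by simp [Ne.symm h4]
  have e5 : ('@' == c) = false := by simp [Ne.symm h5]
  have e6 : ('?' == c) = false := by simp [Ne.symm h6]
  have e7 : ((' ' : Char) == c) = false := by simp [Ne.symm h7]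
  simp [subChar, escTable, PySem.Dict.getD, PySem.Dict.get?,
        List.find?, e1, e2, e3, e4, e5, e6, e7, h1, h2, h3, h4, h5, h6, h7]

theorem join_empty_eq_flatten (parts : List (List Char)) :
    PySem.Chars.join [] parts = parts.flatten := by
  simp [PySem.Chars.join, List.intercalate]
  induction parts with
  | nil => simp
  | cons p ps ih => cases ps <;> simp_all [List.intersperse]

-- ===== VERDICT (by name: the statement is the Claim_ definition above) =====
theorem make_url_safe_spec : Claim_equal_make_url_safe := by
  intro s _
  unfold Spec_make_url_safe make_url_safe make_url_safe_alt
  apply String.ext  -- equality of strings from equality of char lists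
  simp only [List.foldl, PySem.Str.toList_replace, PySem.Str.join, String.toList_ofList]
  rw [show ("%" : String).toList = ['%'] from rfl, show ("#" : String).toList = ['#'] from rfl,
      show (":" : String).toList = [':'] from rfl, show ("/" : String).toList = ['/'] from rfl,
      show ("@" : String).toList = ['@'] from rfl, show ("?" : String).toList = ['?'] from rfl,
      show (" " : String).toList = [' '] from rfl, show ("" : String).toList = [] from rfl]
  simp only [replace_single, List.flatMap_assoc, join_empty_eq_flatten, List.map_map,
             ← List.flatMap_def]
  congr 1
  funext c
  exact composite_eq_escB c
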